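-- pv_equiv track=rewrite | github.com/michel-lopez-franco/ClaseTraductores | lexico.py | siguiente_token
-- ===== SOURCE A (Python) =====
-- def siguiente_token(entrada):
--     edo = 0
--     token = ""
--     for c in entrada:
--         match edo:
--             case 0:
--                 if c >= "a" and c <= "z":
--                     edo = 1
--                     token += c
--                 if c >= "0" and c <= "9":
--                     edo = 2
--                     token += c
--
--             case 1:
--                 if c >= "a" and c <= "z":
--                     token += c
--                 else:
--                     break
--             case 2:
--                 if c >= "0" and c <= "9":
--                     token += c
--                 else:
--                     break
--
--     match edo:
--         case 1:
--             return "str", token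
--         case 2:
--             return "int", token
--         case _:
--             return "EOF", None
-- ===== SOURCE B (Python) =====
-- def _span(pred, s):
--     """Longest prefix of s whose characters all satisfy pred."""
--     n = 0
--     while n < len(s) and pred(s[n]):
--         n += 1
--     return s[:n]
--
--
-- def siguiente_token(entrada):
--     islow = lambda c: 'a' <= c <= 'z'
--     isdig = lambda c: '0' <= c <= '9'
--     # drop leading insignificant characters
--     while entrada and not (islow(entrada[0]) or isdig(entrada[0])):
--         entrada = entrada[1:]
--     if not entrada:
--         return "EOF", None
--     if isdig(entrada[0]):
--         return "int", _span(isdig, entrada)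
--     return "str", _span(islow, entrada)
-- ===== Notes on version B (the rewrite author's own statement) =====
-- stated objective: simpler
-- what changed: Replaces A's three-state DFA with an accumulated token string by a two-phase scan: drop the leading insignificant characters, then slice off the longest lowercase-letter or digit prefix with a shared span helper.
import Mathlib
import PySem

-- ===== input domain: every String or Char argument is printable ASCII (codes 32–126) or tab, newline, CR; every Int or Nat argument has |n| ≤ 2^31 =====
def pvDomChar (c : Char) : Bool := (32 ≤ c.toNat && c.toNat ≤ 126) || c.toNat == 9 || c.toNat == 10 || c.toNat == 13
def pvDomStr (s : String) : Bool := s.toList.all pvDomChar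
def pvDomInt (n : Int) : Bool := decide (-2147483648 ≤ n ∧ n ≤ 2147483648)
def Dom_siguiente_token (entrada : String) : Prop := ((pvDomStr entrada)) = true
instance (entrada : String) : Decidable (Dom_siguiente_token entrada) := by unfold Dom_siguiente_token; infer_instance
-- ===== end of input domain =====

-- B replaces A's three-state DFA with an explicit drop-junk-prefix / take-token-prefix scan (simpler decomposition, same O(n) cost).

-- ===== PORT A =====
-- the for-loop over entrada with state edo and accumulator token; `break` becomes returning the state
def pvLoopA : List Char → Nat → List Char → Nat × List Char
  | [], edo, tok => (edo, tok)
  | c :: cs, edo, tok =>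
    match edo with
    | 0 =>
      let s1 := if 'a' ≤ c ∧ c ≤ 'z' then (1, tok ++ [c]) else (0, tok)
      let s2 := if '0' ≤ c ∧ c ≤ '9' then (2, s1.2 ++ [c]) else s1
      pvLoopA cs s2.1 s2.2
    | 1 => if 'a' ≤ c ∧ c ≤ 'z' then pvLoopA cs 1 (tok ++ [c]) else (1, tok)
    | 2 => if '0' ≤ c ∧ c ≤ '9' then pvLoopA cs 2 (tok ++ [c]) else (2, tok)
    | _ => pvLoopA cs edo tok

def siguiente_token (entrada : String) : String × Option String :=
  let r := pvLoopA entrada.toList 0 []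
  match r.1 with
  | 1 => ("str", some (String.ofList r.2))
  | 2 => ("int", some (String.ofList r.2))
  | _ => ("EOF", none)

-- ===== PORT B =====
def pvIsLow (c : Char) : Bool := decide ('a' ≤ c) && decide (c ≤ 'z')
def pvIsDig (c : Char) : Bool := decide ('0' ≤ c) && decide (c ≤ '9')

-- _span: longest prefix satisfying pred
def pvSpan (p : Char → Bool) : List Char → List Char
  | [] => []
  | c :: cs => if p c then c :: pvSpan p cs else []

-- the `while entrada and not (...): entrada = entrada[1:]` loop
def pvDropJunk : List Char → List Char
  | [] => []
  | c :: cs => if pvIsLow c || pvIsDig c then c :: cs else pvDropJunk cs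

def siguiente_token_alt (entrada : String) : String × Option String :=
  match pvDropJunk entrada.toList with
  | [] => ("EOF", none)
  | c :: cs =>
    if pvIsDig c then ("int", some (String.ofList (pvSpan pvIsDig (c :: cs))))
    else ("str", some (String.ofList (pvSpan pvIsLow (c :: cs))))

-- ===== PRECONDITION & SPEC =====
def Spec_siguiente_token (entrada : String) (out : String × Option String) : Prop := out = siguiente_token_alt entrada
instance (entrada : String) (out : String × Option String) : Decidable (Spec_siguiente_token entrada out) := by unfold Spec_siguiente_token; infer_instance

-- ===== CLAIM (what is proved, stated in full; the proofs are below) =====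
def Claim_equal_siguiente_token : Prop := ∀ (entrada : String), Dom_siguiente_token entrada → Spec_siguiente_token entrada (siguiente_token entrada)

-- ===== LEMMAS AND PROOFS =====

theorem pvLoopA_junk (l : List Char) (tok : List Char) :
    pvLoopA l 0 tok = pvLoopA (pvDropJunk l) 0 tok := by
  induction l with
  | nil => rfl
  | cons c cs ih =>
    by_cases hl : 'a' ≤ c ∧ c ≤ 'z'
    · simp [pvDropJunk, pvIsLow, hl.1, hl.2]
    · by_cases hd : '0' ≤ c ∧ c ≤ '9'
      · simp [pvDropJunk, pvIsDig, hd.1, hd.2]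
      · have h1 : ¬ (pvIsLow c || pvIsDig c) = true := by
          simp [pvIsLow, pvIsDig]
          constructor
          · intro h; exact lt_of_not_ge (fun h2 => hl ⟨h, h2⟩)
          · intro h; exact lt_of_not_ge (fun h2 => hd ⟨h, h2⟩)
        simp [pvDropJunk, h1, pvLoopA, hl, hd]
        exact ih

theorem pvLoopA_one (cs : List Char) (tok : List Char) :
    pvLoopA cs 1 tok = (1, tok ++ pvSpan pvIsLow cs) := by
  induction cs generalizing tok with
  | nil => simp [pvLoopA, pvSpan]
  | cons c cs ih =>
    by_cases hl : 'a' ≤ c ∧ c ≤ 'z'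
    · simp [pvLoopA, hl, pvSpan, pvIsLow, ih]
    · have h1 : ¬ pvIsLow c = true := by
        simp [pvIsLow]; intro h; exact lt_of_not_ge fun h2 => hl ⟨h, h2⟩
      simp [pvLoopA, hl, pvSpan, h1]

theorem pvLoopA_two (cs : List Char) (tok : List Char) :
    pvLoopA cs 2 tok = (2, tok ++ pvSpan pvIsDig cs) := by
  induction cs generalizing tok with
  | nil => simp [pvLoopA, pvSpan]
  | cons c cs ih =>
    by_cases hd : '0' ≤ c ∧ c ≤ '9'
    · simp [pvLoopA, hd, pvSpan, pvIsDig, ih]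
    · have h1 : ¬ pvIsDig c = true := by
        simp [pvIsDig]; intro h; exact lt_of_not_ge fun h2 => hd ⟨h, h2⟩
      simp [pvLoopA, hd, pvSpan, h1]

theorem pvDropJunk_head (l : List Char) (c : Char) (cs : List Char)
    (h : pvDropJunk l = c :: cs) : (pvIsLow c || pvIsDig c) = true := by
  induction l with
  | nil => simp [pvDropJunk] at h
  | cons a as ih =>
    by_cases hs : (pvIsLow a || pvIsDig a) = true
    · simp [pvDropJunk, hs] at h
      rw [← h.1]; exact hs
    · simp [pvDropJunk, hs] at h
      exact ih h

-- a digit is never a lowercase letter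
theorem pvDig_not_low (c : Char) (hd : pvIsDig c = true) : ¬ ('a' ≤ c ∧ c ≤ 'z') := by
  simp [pvIsDig] at hd
  intro h
  exact absurd (le_trans h.1 hd.2) (by decide)

-- ===== VERDICT (by name: the statement is the Claim_ definition above) =====
theorem siguiente_token_spec : Claim_equal_siguiente_token := by
  intro entrada _
  unfold Spec_siguiente_token siguiente_token siguiente_token_alt
  rw [pvLoopA_junk]
  cases h : pvDropJunk entrada.toList with
  | nil => rfl
  | cons c cs =>
    by_cases hdg : pvIsDig c = true
    · have hd : '0' ≤ c ∧ c ≤ '9' := by simpa [pvIsDig] using hdg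
      have hnl := pvDig_not_low c hdg
      simp [pvLoopA, hnl, hd, pvLoopA_two, pvSpan, hdg]
    · -- head of pvDropJunk is significant, so it must be a lowercase letter
      have hsig : (pvIsLow c || pvIsDig c) = true := pvDropJunk_head _ _ _ h
      have hlw : pvIsLow c = true := by
        cases hor : pvIsLow c
        · simp [hor, hdg] at hsig
        · rfl
      have hl : 'a' ≤ c ∧ c ≤ 'z' := by simpa [pvIsLow] using hlw
      have hnd : ¬ ('0' ≤ c ∧ c ≤ '9') := by
        intro h2; exact hdg (by simp [pvIsDig, h2.1, h2.2])
      simp [pvLoopA, hl, hnd, pvLoopA_one, pvSpan, hlw, hdg]
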